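-- pv_equiv track=rewrite | github.com/ckf42/leetcode-code | sol/1590/1590.py | minSubarray
-- ===== SOURCE A (Python) =====
-- from typing import List
--
-- def minSubarray(nums: List[int], p: int) -> int:
--     n = len(nums)
--     remainder = sum(nums) % p
--     if remainder == 0:
--         return 0
--     d = {0: -1}
--     tot = 0
--     res = n
--     for i, x in enumerate(nums):
--         tot = (tot + x) % p
--         j = d.get((tot - remainder + p) % p, -2)
--         if j != -2:
--             res = min(res, i - j)
--         d[tot] = i
--     return res if res != n else -1
-- ===== SOURCE B (Python) =====
-- def _lastBelow(pref, i, target):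
--     # last index j < i with pref[j] == target, scanning backwards; None if absent
--     for j in range(i - 1, -1, -1):
--         if pref[j] == target:
--             return j
--     return None
--
--
-- def minSubarray(nums, p):
--     n = len(nums)
--     remainder = sum(nums) % p
--     if remainder == 0:
--         return 0
--     pref = [0]
--     for x in nums:
--         pref.append((pref[-1] + x) % p)
--     best = n
--     for i in range(1, n + 1):
--         target = (pref[i] - remainder) % p
--         j = _lastBelow(pref, i, target)
--         if j is not None:
--             best = min(best, i - j)
--     return best if best != n else -1
-- ===== Notes on version B (the rewrite author's own statement) =====
-- stated objective: alternative
-- what changed: Replaces A's single pass with a last-occurrence hashmap of running prefix remainders by an explicitly precomputed prefix-remainder array plus, for each end position, a direct backward scan for the nearest matching prefix remainder.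
import Mathlib
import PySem

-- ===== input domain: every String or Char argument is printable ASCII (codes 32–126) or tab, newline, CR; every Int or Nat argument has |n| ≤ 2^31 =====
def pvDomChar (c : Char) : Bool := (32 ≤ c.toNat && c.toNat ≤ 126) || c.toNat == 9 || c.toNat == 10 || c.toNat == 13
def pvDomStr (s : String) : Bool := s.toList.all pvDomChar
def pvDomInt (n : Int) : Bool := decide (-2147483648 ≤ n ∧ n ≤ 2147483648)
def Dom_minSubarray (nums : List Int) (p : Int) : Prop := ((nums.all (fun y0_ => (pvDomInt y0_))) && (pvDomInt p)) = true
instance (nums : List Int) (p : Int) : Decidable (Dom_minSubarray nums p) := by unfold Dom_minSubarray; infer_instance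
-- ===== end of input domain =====

-- B replaces A's last-occurrence hashmap one-pass with a precomputed prefix-remainder
-- array and a direct backward scan per end position (alternative algorithm, not faster).


-- ===== PORT A =====
-- 'for i, x in enumerate(nums): …' ported as structural recursion on nums carrying
-- the index i and the loop state (d, tot, res).
def minSubarrayLoopA (p remainder : Int) : List Int → PySem.Dict Int Int → Int → Int → Int → Int
  | [], _, _, _, res => res
  | x :: rest, d, tot, i, res =>
      let tot' := PySem.Int.mod (tot + x) p
      let j := PySem.Dict.getD d (PySem.Int.mod (tot' - remainder + p) p) (-2)
      let res' := if j ≠ -2 then min res (i - j) else res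
      minSubarrayLoopA p remainder rest (PySem.Dict.insert d tot' i) tot' (i + 1) res'

def minSubarray (nums : List Int) (p : Int) : Int :=
  let n : Int := nums.length
  let remainder := PySem.Int.mod nums.sum p
  if remainder = 0 then 0
  else
    let res := minSubarrayLoopA p remainder nums (PySem.Dict.insert PySem.Dict.empty 0 (-1)) 0 0 n
    if res ≠ n then res else -1

-- ===== PORT B =====
-- '_lastBelow(pref, i, target)': 'for j in range(i-1, -1, -1)' with early return, ported
-- as countdown recursion on the number i of indices still to check (j = i-1 first).
def lastBelow (pref : List Int) (i : Nat) (target : Int) : Option Int :=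
  match i with
  | 0 => none
  | k + 1 => if pref.getD k 0 = target then some (k : Int) else lastBelow pref k target

def minSubarray_alt (nums : List Int) (p : Int) : Int :=
  let n : Int := nums.length
  let remainder := PySem.Int.mod nums.sum p
  if remainder = 0 then 0
  else
    let pref := nums.foldl (fun acc x => acc ++ [PySem.Int.mod (acc.getLast! + x) p]) [(0 : Int)]
    let best := (PySem.List.pyRange 1 (n + 1) 1).foldl (fun best i =>
        let target := PySem.Int.mod (pref.getD i.toNat 0 - remainder) p
        match lastBelow pref i.toNat target with
        | some j => min best (i - j)
        | none => best) n
    if best ≠ n then best else -1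

-- ===== PRECONDITION & SPEC =====
-- Pre_ excludes exactly p = 0, where Python's '%' raises ZeroDivisionError.
def Pre_minSubarray (nums : List Int) (p : Int) : Prop := p ≠ 0
instance (nums : List Int) (p : Int) : Decidable (Pre_minSubarray nums p) := by unfold Pre_minSubarray; infer_instance
def pvWitness_minSubarray : List Int × Int := ([3, 1, 4, 2], 6)

def Spec_minSubarray (nums : List Int) (p : Int) (out : Int) : Prop := out = minSubarray_alt nums p
instance (nums : List Int) (p : Int) (out : Int) : Decidable (Spec_minSubarray nums p out) := by unfold Spec_minSubarray; infer_instance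

-- ===== CLAIM (what is proved, stated in full; the proofs are below) =====
def Claim_equal_minSubarray : Prop := ∀ (nums : List Int) (p : Int), Dom_minSubarray nums p → Pre_minSubarray nums p → Spec_minSubarray nums p (minSubarray nums p)

-- ===== LEMMAS AND PROOFS =====

-- proof-side scan of prefix remainders: qscan p l c = [c, (c+l₀)%p, …]
def qscan (p : Int) : List Int → Int → List Int
  | [], c => [c]
  | x :: l, c => c :: qscan p l (PySem.Int.mod (c + x) p)

theorem qscan_length (p : Int) (l : List Int) (c : Int) : (qscan p l c).length = l.length + 1 := by
  induction l generalizing c with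
  | nil => rfl
  | cons x l ih => simp [qscan, ih]

theorem qscan_getD_zero (p : Int) (l : List Int) (c : Int) : (qscan p l c).getD 0 0 = c := by
  cases l <;> rfl

-- B's pref fold builds exactly qscan
theorem prefFold_eq_qscan (p : Int) (l : List Int) : ∀ (A : List Int) (c : Int),
    l.foldl (fun acc x => acc ++ [PySem.Int.mod (acc.getLast! + x) p]) (A ++ [c])
      = A ++ qscan p l c := by
  induction l with
  | nil => intro A c; simp [qscan]
  | cons x l ih =>
      intro A c
      have hlast : (A ++ [c]).getLast! = c := by
        cases A with
        | nil => rfl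
        | cons a as => simp [List.getLast!]
      simp only [List.foldl_cons, hlast]
      have := ih (A ++ [c]) (PySem.Int.mod (c + x) p)
      simpa [qscan, List.append_assoc] using this

theorem mod_add_self' (a p : Int) : PySem.Int.mod (a + p) p = PySem.Int.mod a p := by
  simp [PySem.Int.mod]

-- value of the dict built by A, expressed through B's backward scan
def ofLB : Option Int → Int
  | some m => m - 1
  | none => -2

theorem lastBelow_bounds (pref : List Int) (t : Int) :
    ∀ (i : Nat) (m : Int), lastBelow pref i t = some m → 0 ≤ m ∧ m + 1 ≤ (i : Int) := by
  intro i
  induction i with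
  | zero => intro m h; simp [lastBelow] at h
  | succ k ih =>
      intro m h
      rw [lastBelow] at h
      by_cases hc : pref.getD k 0 = t
      · rw [if_pos hc] at h
        have : (k : Int) = m := by simpa using h
        push_cast
        omega
      · rw [if_neg hc] at h
        have := ih m h
        push_cast
        omega

-- main loop correspondence: A's dict-driven loop from step k equals B's remaining fold
theorem loop_corr (p remainder : Int) (pref : List Int) :
    ∀ (rest : List Int) (k : Nat) (d : PySem.Dict Int Int) (tot res : Int),
      pref.drop k = qscan p rest tot →
      (∀ t, PySem.Dict.getD d t (-2) = ofLB (lastBelow pref (k + 1) t)) →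
      minSubarrayLoopA p remainder rest d tot (k : Int) res
        = (PySem.List.pyRange ((k : Int) + 1) ((pref.length : Int) - 1 + 1) 1).foldl
            (fun best i =>
              let target := PySem.Int.mod (pref.getD i.toNat 0 - remainder) p
              match lastBelow pref i.toNat target with
              | some j => min best (i - j)
              | none => best) res := by
  intro rest
  induction rest with
  | nil =>
      intro k d tot res hdrop hd
      have h1 : pref.length - k = 1 := by
        have := congrArg List.length hdrop
        simpa [qscan] using this
      rw [PySem.List.pyRange_one_eq_nil (by omega)]
      simp [minSubarrayLoopA]
  | cons x rest ih =>
      intro k d tot res hdrop hd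
      have hlendrop : pref.length - k = rest.length + 2 := by
        have := congrArg List.length hdrop
        simpa [qscan, qscan_length] using this
      have hk1lt : k + 1 < pref.length := by omega
      set tot' := PySem.Int.mod (tot + x) p with htot'
      have hqcons : qscan p (x :: rest) tot = tot :: qscan p rest tot' := by
        simp [qscan, htot']
      have hdropc : pref.drop k = tot :: qscan p rest tot' := by rw [hdrop, hqcons]
      have hdrop' : pref.drop (k + 1) = qscan p rest tot' := by
        have h := congrArg List.tail hdropc
        rwa [List.tail_drop, List.tail_cons] at h
      have hgetk1 : pref.getD (k + 1) 0 = tot' := by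
        have h : pref.getD (k + 1) 0 = (pref.drop (k + 1)).getD 0 0 := by
          simp [List.getD, List.getElem?_drop]
        rw [h, hdrop', qscan_getD_zero]
      have hrange : PySem.List.pyRange ((k : Int) + 1) ((pref.length : Int) - 1 + 1) 1
          = ((k : Int) + 1) :: PySem.List.pyRange ((k : Int) + 1 + 1) ((pref.length : Int) - 1 + 1) 1 := by
        apply PySem.List.pyRange_one_cons
        have : (k : Int) + 1 < (pref.length : Int) := by exact_mod_cast hk1lt
        omega
      have hkey : PySem.Int.mod (tot' - remainder + p) p
          = PySem.Int.mod (pref.getD (k + 1) 0 - remainder) p := by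
        rw [hgetk1, mod_add_self']
      -- dict invariant is preserved by the insert
      have hd' : ∀ t, PySem.Dict.getD (PySem.Dict.insert d tot' (k : Int)) t (-2)
          = ofLB (lastBelow pref (k + 1 + 1) t) := by
        intro t
        have hunfold : lastBelow pref (k + 1 + 1) t
            = if pref.getD (k + 1) 0 = t then some ((k + 1 : Nat) : Int) else lastBelow pref (k + 1) t := rfl
        rw [PySem.Dict.getD_insert, hunfold, hgetk1]
        by_cases ht : t = tot'
        · rw [if_pos ht, if_pos ht.symm]
          simp [ofLB]
        · rw [if_neg ht, if_neg (fun h => ht h.symm), hd t]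
      -- A's step equals B's step at i = k+1
      set f : Int → Int → Int := (fun best i =>
          let target := PySem.Int.mod (pref.getD i.toNat 0 - remainder) p
          match lastBelow pref i.toNat target with
          | some j => min best (i - j)
          | none => best) with hf
      have htn : ((k : Int) + 1).toNat = k + 1 := by omega
      have hfval : f res ((k : Int) + 1)
          = (if PySem.Dict.getD d (PySem.Int.mod (tot' - remainder + p) p) (-2) ≠ -2 then
              min res ((k : Int) - PySem.Dict.getD d (PySem.Int.mod (tot' - remainder + p) p) (-2))
            else res) := by
        rw [hf]
        simp only [htn, hkey, hd]
        cases hlb : lastBelow pref (k + 1) (PySem.Int.mod (pref.getD (k + 1) 0 - remainder) p) with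
        | none => simp [ofLB]
        | some m =>
            have hm := lastBelow_bounds pref _ (k + 1) m hlb
            simp only [ofLB]
            have hne : (m : Int) - 1 ≠ -2 := by push_cast at hm; omega
            rw [if_pos hne]
            congr 1
            omega
      rw [hrange, List.foldl_cons, hfval]
      have hres := ih (k + 1) (PySem.Dict.insert d tot' (k : Int)) tot'
        (if PySem.Dict.getD d (PySem.Int.mod (tot' - remainder + p) p) (-2) ≠ -2 then
            min res ((k : Int) - PySem.Dict.getD d (PySem.Int.mod (tot' - remainder + p) p) (-2))
          else res) hdrop' hd'
      have hc : ((k + 1 : Nat) : Int) = (k : Int) + 1 := by push_cast; ring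
      rw [hc] at hres
      rw [minSubarrayLoopA]
      exact hres

-- ===== VERDICT (by name: the statement is the Claim_ definition above) =====
theorem minSubarray_spec : Claim_equal_minSubarray := by
  intro nums p _ _
  unfold Spec_minSubarray minSubarray minSubarray_alt
  by_cases hr : PySem.Int.mod nums.sum p = 0
  · simp [hr]
  · simp only [hr, if_false]
    have hpref : nums.foldl (fun acc x => acc ++ [PySem.Int.mod (acc.getLast! + x) p]) [(0 : Int)]
        = qscan p nums 0 := by
      have := prefFold_eq_qscan p nums [] 0
      simpa using this
    rw [hpref]
    have hd0 : ∀ t, PySem.Dict.getD (PySem.Dict.insert PySem.Dict.empty (0 : Int) (-1)) t (-2)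
        = ofLB (lastBelow (qscan p nums 0) (0 + 1) t) := by
      intro t
      have hunfold : lastBelow (qscan p nums 0) 1 t
          = if (qscan p nums 0).getD 0 0 = t then some ((0 : Nat) : Int) else none := rfl
      rw [PySem.Dict.getD_insert, hunfold, qscan_getD_zero]
      by_cases ht : t = 0
      · rw [if_pos ht, if_pos ht.symm]; simp [ofLB]
      · rw [if_neg ht, if_neg (fun h => ht h.symm), PySem.Dict.getD_empty]; rfl
    have h := loop_corr p (PySem.Int.mod nums.sum p) (qscan p nums 0) nums 0
      (PySem.Dict.insert PySem.Dict.empty 0 (-1)) 0 (nums.length : Int) rfl hd0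
    have hlen : ((qscan p nums 0).length : Int) - 1 + 1 = (nums.length : Int) + 1 := by
      rw [qscan_length]; push_cast; ring
    rw [hlen] at h
    simp only [Nat.cast_zero, zero_add] at h
    rw [h]
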